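-- pv_equiv track=rewrite | github.com/kentblock/CSES-problems | dynamic_programming/removal_game/removal_game.py | removal_game_tabulation
-- ===== SOURCE A (Python) =====
-- def removal_game_tabulation(nums):
--     if not nums:
--         return 0
--     dp = [[0 for _ in range(len(nums))] for _ in range(len(nums))]
--     turn = (len(nums) - 1) & 1
--
--     for k in range(len(nums)):
--         dp[k][k] = nums[k] if not turn else 0
--
--     for i in range(len(nums) -1, -1, -1):
--         for j in range(i + 1, len(nums)):
--             if turn == ((j - i) & 1):
--                 dp[i][j] = max(
--                     nums[i] + dp[i + 1][j],
--                     nums[j] + dp[i][j - 1]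
--                 )
--             else:
--                 dp[i][j] = min(
--                     dp[i + 1][j],
--                     dp[i][j - 1]
--                 )
--     return dp[0][len(nums) - 1]
-- ===== SOURCE B (Python) =====
-- def removal_game_tabulation(nums):
--     if not nums:
--         return 0
--     n = len(nums)
--     d = list(nums)  # d[i] = best (mover minus other) over the interval of current length starting at i
--     for length in range(2, n + 1):
--         d = [max(nums[i] - d[i + 1], nums[i + length - 1] - d[i])
--              for i in range(n - length + 1)]
--     return (sum(nums) + d[0]) // 2
-- ===== Notes on version B (the rewrite author's own statement) =====
-- stated objective: alternative
-- what changed: Replaced A's absolute-score interval DP over a full n-by-n table with a turn-parity variable and a max/min branch by the standard difference (advantage) interval DP kept in a rolling 1-D list, reconstructing player 1's score as (sum(nums) + advantage) // 2.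
import Mathlib
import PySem

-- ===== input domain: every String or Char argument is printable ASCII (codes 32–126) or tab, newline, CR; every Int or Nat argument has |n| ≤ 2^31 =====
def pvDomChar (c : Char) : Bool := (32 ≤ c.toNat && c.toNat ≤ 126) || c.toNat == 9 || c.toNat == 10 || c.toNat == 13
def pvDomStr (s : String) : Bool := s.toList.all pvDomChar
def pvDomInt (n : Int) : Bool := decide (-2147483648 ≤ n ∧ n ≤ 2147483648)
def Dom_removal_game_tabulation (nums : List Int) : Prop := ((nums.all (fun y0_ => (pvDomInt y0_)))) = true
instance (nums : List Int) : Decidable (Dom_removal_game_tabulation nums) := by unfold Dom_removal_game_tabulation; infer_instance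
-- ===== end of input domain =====

-- B replaces A's absolute-score/turn-parity 2-D table by the standard 1-D difference (advantage) interval DP,
-- reconstructing player 1's score as (sum + advantage) // 2 (exact: sum + advantage is even); objective: alternative/simpler.

-- ===== PORT A =====
-- nested-list table: dp[i][j]; indices are always in range in A, getD 0 / set are exact there
def pvGet2 (dp : List (List Int)) (i j : Nat) : Int := (dp.getD i []).getD j 0
def pvSet2 (dp : List (List Int)) (i j : Nat) (v : Int) : List (List Int) :=
  dp.set i ((dp.getD i []).set j v)

-- inner loop: for j in range(i+1, len(nums))
def pvRowA (a : List Int) (n turn i : Nat) (dp : List (List Int)) : List (List Int) :=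
  (List.range' (i + 1) (n - (i + 1))).foldl (fun dp j =>
    if turn = (j - i) % 2 then
      pvSet2 dp i j (max (a.getD i 0 + pvGet2 dp (i + 1) j) (a.getD j 0 + pvGet2 dp i (j - 1)))
    else
      pvSet2 dp i j (min (pvGet2 dp (i + 1) j) (pvGet2 dp i (j - 1)))) dp

def removal_game_tabulation (nums : List Int) : Int :=
  if nums = [] then 0
  else
    let n := nums.length
    let dp0 : List (List Int) := List.replicate n (List.replicate n 0)
    let turn := (n - 1) % 2
    -- for k in range(len(nums)): dp[k][k] = nums[k] if not turn else 0
    let dp1 := (List.range n).foldl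
      (fun dp k => pvSet2 dp k k (if turn = 0 then nums.getD k 0 else 0)) dp0
    -- for i in range(len(nums)-1, -1, -1): (List.range n).reverse = [n-1, …, 0]
    let dp2 := ((List.range n).reverse).foldl (fun dp i => pvRowA nums n turn i dp) dp1
    pvGet2 dp2 0 (n - 1)

-- ===== PORT B =====
-- d = [max(nums[i] - d[i+1], nums[i+length-1] - d[i]) for i in range(n - length + 1)]
def pvStepB (a : List Int) (n : Nat) (d : List Int) (length : Nat) : List Int :=
  (List.range (n - length + 1)).map (fun i =>
    max (a.getD i 0 - d.getD (i + 1) 0) (a.getD (i + length - 1) 0 - d.getD i 0))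

def removal_game_tabulation_alt (nums : List Int) : Int :=
  if nums = [] then 0
  else
    let n := nums.length
    -- for length in range(2, n+1): List.range' 2 (n-1) = [2, …, n]
    let d := (List.range' 2 (n - 1)).foldl (pvStepB nums n) nums
    PySem.Int.floordiv (nums.sum + d.getD 0 0) 2

-- ===== PRECONDITION & SPEC =====
def Spec_removal_game_tabulation (nums : List Int) (out : Int) : Prop := out = removal_game_tabulation_alt nums
instance (nums : List Int) (out : Int) : Decidable (Spec_removal_game_tabulation nums out) := by unfold Spec_removal_game_tabulation; infer_instance

-- ===== CLAIM (what is proved, stated in full; the proofs are below) =====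
def Claim_equal_removal_game_tabulation : Prop := ∀ (nums : List Int), Dom_removal_game_tabulation nums → Spec_removal_game_tabulation nums (removal_game_tabulation nums)

-- ===== LEMMAS AND PROOFS =====

-- reference recursive difference DP: ddiff a i j = best (mover − other) on a[i..j]
def ddiff (a : List Int) (i j : Nat) : Int :=
  if i < j then
    max (a.getD i 0 - ddiff a (i + 1) j) (a.getD j 0 - ddiff a i (j - 1))
  else a.getD i 0
termination_by j - i
decreasing_by all_goals omega

-- reference recursion for A's table value
def fA (a : List Int) (turn i j : Nat) : Int :=
  if i < j then
    if turn = (j - i) % 2 then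
      max (a.getD i 0 + fA a turn (i + 1) j) (a.getD j 0 + fA a turn i (j - 1))
    else
      min (fA a turn (i + 1) j) (fA a turn i (j - 1))
  else if turn = 0 then a.getD i 0 else 0
termination_by j - i
decreasing_by all_goals omega

theorem fA_diag (a : List Int) (turn i : Nat) :
    fA a turn i i = if turn = 0 then a.getD i 0 else 0 := by
  rw [fA]; simp

theorem fA_lt (a : List Int) (turn : Nat) {i j : Nat} (h : i < j) :
    fA a turn i j =
      if turn = (j - i) % 2 then
        max (a.getD i 0 + fA a turn (i + 1) j) (a.getD j 0 + fA a turn i (j - 1))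
      else
        min (fA a turn (i + 1) j) (fA a turn i (j - 1)) := by
  rw [fA]; simp [h]

theorem ddiff_lt (a : List Int) {i j : Nat} (h : i < j) :
    ddiff a i j = max (a.getD i 0 - ddiff a (i + 1) j) (a.getD j 0 - ddiff a i (j - 1)) := by
  rw [ddiff]; simp [h]

-- interval sum a[i..j]
def iSum (a : List Int) (i j : Nat) : Int := ∑ k ∈ Finset.Icc i j, a.getD k 0

theorem iSum_diag (a : List Int) (i : Nat) : iSum a i i = a.getD i 0 := by
  simp [iSum]

theorem iSum_left (a : List Int) {i j : Nat} (h : i < j) :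
    iSum a i j = a.getD i 0 + iSum a (i + 1) j := by
  unfold iSum
  rw [show Finset.Icc i j = insert i (Finset.Icc (i + 1) j) by ext k; simp; omega,
    Finset.sum_insert (by simp)]

theorem iSum_right (a : List Int) {i j : Nat} (h : i < j) :
    iSum a i j = iSum a i (j - 1) + a.getD j 0 := by
  unfold iSum
  rw [show Finset.Icc i j = insert j (Finset.Icc i (j - 1)) by ext k; simp; omega,
    Finset.sum_insert (by simp; omega)]
  ring

-- the central arithmetic bridge: twice A's table value = interval sum ± the advantage
theorem twice_fA (a : List Int) (turn : Nat) (hturn : turn < 2) :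
    ∀ m i j, j - i ≤ m → i ≤ j →
      2 * fA a turn i j =
        if turn = (j - i) % 2 then iSum a i j + ddiff a i j else iSum a i j - ddiff a i j := by
  intro m
  induction m with
  | zero =>
    intro i j hm hij
    have hji : j = i := by omega
    subst hji
    rw [fA_diag, ddiff, iSum_diag]
    have : turn = 0 ∨ turn = 1 := by omega
    rcases this with h | h <;> subst h <;> simp <;> ring
  | succ m ih =>
    intro i j hm hij
    rcases Nat.eq_or_lt_of_le hij with hji | hlt
    · subst hji
      rw [fA_diag, ddiff, iSum_diag]
      have : turn = 0 ∨ turn = 1 := by omega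
      rcases this with h | h <;> subst h <;> simp <;> ring
    · have h1 : 2 * fA a turn (i + 1) j =
          if turn = (j - (i+1)) % 2 then iSum a (i+1) j + ddiff a (i+1) j
          else iSum a (i+1) j - ddiff a (i+1) j := ih (i+1) j (by omega) (by omega)
      have h2 : 2 * fA a turn i (j - 1) =
          if turn = ((j-1) - i) % 2 then iSum a i (j-1) + ddiff a i (j-1)
          else iSum a i (j-1) - ddiff a i (j-1) := ih i (j-1) (by omega) (by omega)
      have e1 : iSum a i j = a.getD i 0 + iSum a (i+1) j := iSum_left a hlt
      have e2 : iSum a i j = iSum a i (j-1) + a.getD j 0 := iSum_right a hlt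
      rw [fA_lt a turn hlt, ddiff_lt a hlt]
      by_cases hpar : turn = (j - i) % 2
      · have hp1 : ¬ turn = (j - (i+1)) % 2 := by omega
        have hp2 : ¬ turn = ((j-1) - i) % 2 := by omega
        simp only [if_pos hpar]
        rw [if_neg hp1] at h1; rw [if_neg hp2] at h2
        have k1 : 2 * (a.getD i 0 + fA a turn (i+1) j)
            = iSum a i j + (a.getD i 0 - ddiff a (i+1) j) := by linarith
        have k2 : 2 * (a.getD j 0 + fA a turn i (j-1))
            = iSum a i j + (a.getD j 0 - ddiff a i (j-1)) := by linarith
        rcases le_total (a.getD i 0 - ddiff a (i+1) j) (a.getD j 0 - ddiff a i (j-1)) with hc | hc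
        · rw [max_eq_right hc, max_eq_right (by linarith)]; linarith
        · rw [max_eq_left hc, max_eq_left (by linarith)]; linarith
      · have hp1 : turn = (j - (i+1)) % 2 := by omega
        have hp2 : turn = ((j-1) - i) % 2 := by omega
        simp only [if_neg hpar]
        rw [if_pos hp1] at h1; rw [if_pos hp2] at h2
        have k1 : 2 * fA a turn (i+1) j
            = iSum a i j - (a.getD i 0 - ddiff a (i+1) j) := by linarith
        have k2 : 2 * fA a turn i (j-1)
            = iSum a i j - (a.getD j 0 - ddiff a i (j-1)) := by linarith
        rcases le_total (a.getD i 0 - ddiff a (i+1) j) (a.getD j 0 - ddiff a i (j-1)) with hc | hc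
        · rw [max_eq_right hc, min_eq_right (by linarith)]; linarith
        · rw [max_eq_left hc, min_eq_left (by linarith)]; linarith

-- ----- 2-D table plumbing for A's port -----

def pvDims (n : Nat) (dp : List (List Int)) : Prop :=
  dp.length = n ∧ ∀ r ∈ dp, r.length = n

theorem pvDims_getD {n : Nat} {dp : List (List Int)} (h : pvDims n dp) {i : Nat} (hi : i < n) :
    (dp.getD i []).length = n := by
  obtain ⟨hl, hr⟩ := h
  rw [List.getD_eq_getElem _ _ (by omega)]
  exact hr _ (List.getElem_mem _)

theorem pvDims_set2 {n : Nat} {dp : List (List Int)} (h : pvDims n dp) (i j : Nat) (v : Int) :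
    pvDims n (pvSet2 dp i j v) := by
  by_cases hi : i < dp.length
  · obtain ⟨hl, hr⟩ := h
    refine ⟨by simp [pvSet2, hl], ?_⟩
    intro r hr'
    rcases List.mem_or_eq_of_mem_set hr' with hmem | heq
    · exact hr _ hmem
    · subst heq
      rw [List.length_set]
      exact pvDims_getD ⟨hl, hr⟩ (show i < n by omega)
  · unfold pvSet2
    rw [List.set_eq_of_length_le (by omega)]
    exact h

theorem pvGet2_set2_self {n : Nat} {dp : List (List Int)} (h : pvDims n dp)
    {i j : Nat} (hi : i < n) (hj : j < n) (v : Int) :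
    pvGet2 (pvSet2 dp i j v) i j = v := by
  have h1 : i < dp.length := by rw [h.1]; omega
  have hrow : (dp.getD i []).length = n := pvDims_getD h hi
  unfold pvGet2 pvSet2
  rw [List.getD_eq_getElem (dp.set i ((dp.getD i []).set j v)) [] (by simpa using h1),
    List.getElem_set_self, List.getD_eq_getElem _ _ (by rw [List.length_set, hrow]; omega),
    List.getElem_set_self]

theorem pvGet2_set2_ne {dp : List (List Int)} {i j i' j' : Nat} (hne : i ≠ i' ∨ j ≠ j') (v : Int) :
    pvGet2 (pvSet2 dp i j v) i' j' = pvGet2 dp i' j' := by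
  rcases hne with hne | hne
  · simp [pvGet2, pvSet2, List.getD, List.getElem?_set_ne hne]
  · by_cases hii : i = i'
    · subst hii
      by_cases hlen : i < dp.length
      · simp [pvGet2, pvSet2, List.getD, hlen, List.getElem?_set_ne hne]
      · unfold pvGet2 pvSet2
        rw [List.set_eq_of_length_le (by omega)]
    · simp [pvGet2, pvSet2, List.getD, List.getElem?_set_ne hii]

theorem pvDims_replicate (n : Nat) : pvDims n (List.replicate n (List.replicate (n : Nat) (0 : Int))) := by
  refine ⟨by simp, ?_⟩
  intro r hr
  rw [List.eq_of_mem_replicate hr]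
  simp

-- the diagonal-filling loop leaves a table whose diagonal is fA's base case
theorem pvBaseFold (a : List Int) (turn : Nat) (n : Nat) :
    ∀ m dp, m ≤ n → pvDims n dp →
      pvDims n ((List.range m).foldl
        (fun dp k => pvSet2 dp k k (if turn = 0 then a.getD k 0 else 0)) dp) ∧
      ∀ k, k < m → pvGet2 ((List.range m).foldl
        (fun dp k => pvSet2 dp k k (if turn = 0 then a.getD k 0 else 0)) dp) k k = fA a turn k k := by
  intro m
  induction m with
  | zero => intro dp _ hd; exact ⟨hd, by omega⟩
  | succ m ih =>
    intro dp hm hd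
    rw [List.range_succ, List.foldl_append]
    obtain ⟨hd', hv'⟩ := ih dp (by omega) hd
    refine ⟨pvDims_set2 hd' _ _ _, ?_⟩
    intro k hk
    rcases Nat.lt_or_ge k m with hkm | hkm
    · rw [List.foldl_cons, List.foldl_nil, pvGet2_set2_ne (by omega) _]
      exact hv' k hkm
    · have hkm' : k = m := by omega
      subst hkm'
      rw [List.foldl_cons, List.foldl_nil,
        pvGet2_set2_self hd' (by omega) (by omega), fA_diag]

-- one inner-loop pass over row i, given correct rows above and a correct written prefix
theorem pvRowFold (a : List Int) (n turn i : Nat) (hi : i < n) :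
    ∀ k c dp, i < c → c + k ≤ n → pvDims n dp →
      (∀ i' j', i + 1 ≤ i' → i' ≤ j' → j' < n → pvGet2 dp i' j' = fA a turn i' j') →
      (∀ j', i ≤ j' → j' < c → pvGet2 dp i j' = fA a turn i j') →
      pvDims n ((List.range' c k).foldl (fun dp j =>
          if turn = (j - i) % 2 then
            pvSet2 dp i j (max (a.getD i 0 + pvGet2 dp (i + 1) j) (a.getD j 0 + pvGet2 dp i (j - 1)))
          else
            pvSet2 dp i j (min (pvGet2 dp (i + 1) j) (pvGet2 dp i (j - 1)))) dp) ∧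
      (∀ i'' j'', i'' ≠ i →
        pvGet2 ((List.range' c k).foldl (fun dp j =>
          if turn = (j - i) % 2 then
            pvSet2 dp i j (max (a.getD i 0 + pvGet2 dp (i + 1) j) (a.getD j 0 + pvGet2 dp i (j - 1)))
          else
            pvSet2 dp i j (min (pvGet2 dp (i + 1) j) (pvGet2 dp i (j - 1)))) dp) i'' j'' = pvGet2 dp i'' j'') ∧
      (∀ j', i ≤ j' → j' < c + k →
        pvGet2 ((List.range' c k).foldl (fun dp j =>
          if turn = (j - i) % 2 then
            pvSet2 dp i j (max (a.getD i 0 + pvGet2 dp (i + 1) j) (a.getD j 0 + pvGet2 dp i (j - 1)))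
          else
            pvSet2 dp i j (min (pvGet2 dp (i + 1) j) (pvGet2 dp i (j - 1)))) dp) i j' = fA a turn i j') := by
  intro k
  induction k with
  | zero =>
    intro c dp hc hck hd hhi hrow
    exact ⟨hd, fun _ _ _ => rfl, fun j' h1 h2 => hrow j' h1 (by omega)⟩
  | succ k ih =>
    intro c dp hc hck hd hhi hrow
    rw [List.range'_succ, List.foldl_cons]
    have hv1 : pvGet2 dp (i + 1) c = fA a turn (i + 1) c := hhi (i + 1) c (by omega) (by omega) (by omega)
    have hv2 : pvGet2 dp i (c - 1) = fA a turn i (c - 1) := hrow (c - 1) (by omega) (by omega)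
    have hstep : (if turn = (c - i) % 2 then
          pvSet2 dp i c (max (a.getD i 0 + pvGet2 dp (i + 1) c) (a.getD c 0 + pvGet2 dp i (c - 1)))
        else
          pvSet2 dp i c (min (pvGet2 dp (i + 1) c) (pvGet2 dp i (c - 1))))
        = pvSet2 dp i c (fA a turn i c) := by
      rw [hv1, hv2, fA_lt a turn (show i < c by omega)]
      split_ifs <;> rfl
    rw [hstep]
    have hd' : pvDims n (pvSet2 dp i c (fA a turn i c)) := pvDims_set2 hd _ _ _
    have hhi' : ∀ i' j', i + 1 ≤ i' → i' ≤ j' → j' < n →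
        pvGet2 (pvSet2 dp i c (fA a turn i c)) i' j' = fA a turn i' j' := by
      intro i' j' h1 h2 h3
      rw [pvGet2_set2_ne (by omega) _]
      exact hhi i' j' h1 h2 h3
    have hrow' : ∀ j', i ≤ j' → j' < c + 1 →
        pvGet2 (pvSet2 dp i c (fA a turn i c)) i j' = fA a turn i j' := by
      intro j' h1 h2
      rcases Nat.lt_or_ge j' c with hj | hj
      · rw [pvGet2_set2_ne (by omega) _]
        exact hrow j' h1 hj
      · have : j' = c := by omega
        subst this
        exact pvGet2_set2_self hd hi (by omega) _
    have hres := ih (c + 1) _ (by omega) (by omega) hd' hhi' hrow'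
    refine ⟨hres.1, ?_, fun j' h1 h2 => hres.2.2 j' h1 (by omega)⟩
    intro i'' j'' hne
    rw [hres.2.1 i'' j'' hne, pvGet2_set2_ne (by omega) _]

-- specialisation of pvRowFold to pvRowA
theorem pvRowA_spec (a : List Int) (n turn i : Nat) (hi : i < n) (dp : List (List Int))
    (hd : pvDims n dp)
    (hhi : ∀ i' j', i + 1 ≤ i' → i' ≤ j' → j' < n → pvGet2 dp i' j' = fA a turn i' j')
    (hdiagi : pvGet2 dp i i = fA a turn i i) :
    pvDims n (pvRowA a n turn i dp) ∧
    (∀ i'' j'', i'' ≠ i → pvGet2 (pvRowA a n turn i dp) i'' j'' = pvGet2 dp i'' j'') ∧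
    (∀ j', i ≤ j' → j' < n → pvGet2 (pvRowA a n turn i dp) i j' = fA a turn i j') := by
  have hrow : ∀ j', i ≤ j' → j' < i + 1 → pvGet2 dp i j' = fA a turn i j' := by
    intro j' h1 h2
    have : j' = i := by omega
    subst this
    exact hdiagi
  have h := pvRowFold a n turn i hi (n - (i + 1)) (i + 1) dp (by omega) (by omega) hd hhi hrow
  unfold pvRowA
  exact ⟨h.1, h.2.1, fun j' h1 h2 => h.2.2 j' h1 (by omega)⟩

-- the outer descending loop fills all rows below m correctly
theorem pvOuterFold (a : List Int) (n turn : Nat) :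
    ∀ m dp, m ≤ n → pvDims n dp →
      (∀ k', k' < n → pvGet2 dp k' k' = fA a turn k' k') →
      (∀ i' j', m ≤ i' → i' ≤ j' → j' < n → pvGet2 dp i' j' = fA a turn i' j') →
      ∀ i' j', i' ≤ j' → j' < n →
        pvGet2 (((List.range m).reverse).foldl (fun dp i => pvRowA a n turn i dp) dp) i' j' = fA a turn i' j' := by
  intro m
  induction m with
  | zero =>
    intro dp _ _ _ hall i' j' h1 h2
    simp only [List.range_zero, List.reverse_nil, List.foldl_nil]
    exact hall i' j' (by omega) h1 h2
  | succ m ih =>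
    intro dp hm hd hdiag hhi
    rw [List.range_succ, List.reverse_append, List.reverse_cons, List.reverse_nil,
      List.nil_append, List.singleton_append, List.foldl_cons]
    have hhi' : ∀ i' j', m + 1 ≤ i' → i' ≤ j' → j' < n → pvGet2 dp i' j' = fA a turn i' j' :=
      fun i' j' h1 h2 h3 => hhi i' j' h1 h2 h3
    have hr := pvRowA_spec a n turn m (by omega) dp hd hhi' (hdiag m (by omega))
    have hdiag' : ∀ k', k' < n →
        pvGet2 (pvRowA a n turn m dp) k' k' = fA a turn k' k' := by
      intro k' hk'
      rcases Nat.lt_or_ge k' m with h | h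
      · rw [hr.2.1 k' k' (by omega)]
        exact hdiag k' hk'
      · rcases Nat.eq_or_lt_of_le h with h' | h'
        · subst h'
          exact hr.2.2 m (by omega) hk'
        · rw [hr.2.1 k' k' (by omega)]
          exact hdiag k' hk'
    have hhi'' : ∀ i' j', m ≤ i' → i' ≤ j' → j' < n →
        pvGet2 (pvRowA a n turn m dp) i' j' = fA a turn i' j' := by
      intro i' j' h1 h2 h3
      rcases Nat.eq_or_lt_of_le h1 with h' | h'
      · subst h'
        exact hr.2.2 j' h2 h3
      · rw [hr.2.1 i' j' (by omega)]
        exact hhi i' j' (by omega) h2 h3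
    exact ih (pvRowA a n turn m dp) (by omega) hr.1 hdiag' hhi''

-- ----- B-side: the rolling 1-D table equals ddiff on all intervals of the current length -----

def pvDtab (a : List Int) (L : Nat) : List Int :=
  (List.range (a.length - L + 1)).map (fun i => ddiff a i (i + L - 1))

theorem pvDtab_getD (a : List Int) (L i : Nat) (h : i < a.length - L + 1) :
    (pvDtab a L).getD i 0 = ddiff a i (i + L - 1) := by
  unfold pvDtab
  rw [List.getD_eq_getElem _ _ (by simpa using h)]
  simp

theorem pvStepB_dtab (a : List Int) {L : Nat} (h1 : 1 ≤ L) (h2 : L < a.length) :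
    pvStepB a a.length (pvDtab a L) (L + 1) = pvDtab a (L + 1) := by
  unfold pvStepB
  conv_rhs => rw [pvDtab]
  apply List.map_congr_left
  intro i hi
  rw [List.mem_range] at hi
  rw [pvDtab_getD a L (i + 1) (by omega), pvDtab_getD a L i (by omega),
    show i + (L + 1) - 1 = i + L by omega, show i + 1 + L - 1 = i + L by omega,
    ddiff_lt a (show i < i + L by omega)]

theorem pvFoldB (a : List Int) :
    ∀ k L, 1 ≤ L → L + k ≤ a.length →
      (List.range' (L + 1) k).foldl (pvStepB a a.length) (pvDtab a L) = pvDtab a (L + k) := by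
  intro k
  induction k with
  | zero => intro L h1 h2; simp
  | succ k ih =>
    intro L h1 h2
    rw [List.range'_succ, List.foldl_cons, pvStepB_dtab a h1 (by omega)]
    have h3 := ih (L + 1) (by omega) (by omega)
    rw [show L + (k + 1) = L + 1 + k by omega]
    exact h3

theorem pvDtab_one (a : List Int) (h : a ≠ []) : pvDtab a 1 = a := by
  have hn : 0 < a.length := List.length_pos_iff.mpr h
  unfold pvDtab
  apply List.ext_getElem
  · simp; omega
  · intro i h1 h2
    simp only [List.getElem_map, List.getElem_range]
    rw [show i + 1 - 1 = i by omega, ddiff]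
    simp [List.getD, List.getElem?_eq_getElem h2]

theorem pvSum_range_getD (a : List Int) : ∑ k ∈ Finset.range a.length, a.getD k 0 = a.sum := by
  induction a with
  | nil => simp
  | cons x xs ih =>
    simp only [List.length_cons, List.sum_cons]
    rw [Finset.sum_range_succ']
    simp only [List.getD_cons_succ, List.getD_cons_zero]
    rw [ih]; ring

theorem pvISum_full (a : List Int) (h : a ≠ []) : iSum a 0 (a.length - 1) = a.sum := by
  have hn : 0 < a.length := List.length_pos_iff.mpr h
  unfold iSum
  rw [show Finset.Icc 0 (a.length - 1) = Finset.range a.length by ext k; simp; omega]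
  exact pvSum_range_getD a

-- ----- assembly -----

theorem pvA_eq (a : List Int) (h : a ≠ []) :
    removal_game_tabulation a = fA a ((a.length - 1) % 2) 0 (a.length - 1) := by
  have hn : 0 < a.length := List.length_pos_iff.mpr h
  unfold removal_game_tabulation
  rw [if_neg h]
  show pvGet2 (((List.range a.length).reverse).foldl
      (fun dp i => pvRowA a a.length ((a.length - 1) % 2) i dp)
      ((List.range a.length).foldl
        (fun dp k => pvSet2 dp k k (if (a.length - 1) % 2 = 0 then a.getD k 0 else 0))
        (List.replicate a.length (List.replicate a.length 0)))) 0 (a.length - 1)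
    = fA a ((a.length - 1) % 2) 0 (a.length - 1)
  have hbase := pvBaseFold a ((a.length - 1) % 2) a.length a.length
    (List.replicate a.length (List.replicate a.length 0)) (le_refl _) (pvDims_replicate a.length)
  exact pvOuterFold a a.length ((a.length - 1) % 2) a.length _ (le_refl _) hbase.1 hbase.2
    (fun i' j' h1 h2 h3 => absurd h3 (by omega)) 0 (a.length - 1) (by omega) (by omega)

theorem pvB_eq (a : List Int) (h : a ≠ []) :
    removal_game_tabulation_alt a = PySem.Int.floordiv (a.sum + ddiff a 0 (a.length - 1)) 2 := by
  have hn : 0 < a.length := List.length_pos_iff.mpr h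
  unfold removal_game_tabulation_alt
  rw [if_neg h]
  show PySem.Int.floordiv
      (a.sum + ((List.range' 2 (a.length - 1)).foldl (pvStepB a a.length) a).getD 0 0) 2 = _
  have hfold := pvFoldB a (a.length - 1) 1 (le_refl 1) (by omega)
  rw [pvDtab_one a h] at hfold
  rw [hfold, pvDtab_getD a _ 0 (by omega), show 0 + (1 + (a.length - 1)) - 1 = a.length - 1 by omega]

-- ===== VERDICT (by name: the statement is the Claim_ definition above) =====
theorem removal_game_tabulation_spec : Claim_equal_removal_game_tabulation := by
  unfold Claim_equal_removal_game_tabulation Spec_removal_game_tabulation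
  intro a _
  by_cases h : a = []
  · subst h; rfl
  · have hn : 0 < a.length := List.length_pos_iff.mpr h
    have htwice := twice_fA a ((a.length - 1) % 2) (by omega) a.length 0 (a.length - 1)
      (by omega) (by omega)
    rw [if_pos (by omega)] at htwice
    rw [pvA_eq a h, pvB_eq a h]
    rw [pvISum_full a h] at htwice
    rw [← htwice, PySem.Int.floordiv_eq_ediv_of_pos (by norm_num)]
    omega
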